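-- pv_equiv track=rewrite | github.com/ArfatSalman/bloqs | src/bloqs/ext/pyquil/utils.py | get_qiskit_like_output
-- ===== SOURCE A (Python) =====
-- from functools import reduce
--
-- def get_qiskit_like_output(results_list):
--     results = list(
--         map(
--             lambda arr: reduce(lambda x, y: str(x) + str(y), arr[::-1], ""),
--             results_list,
--         )
--     )
--     counts = dict(zip(results, [results.count(i) for i in results]))
--     return counts
-- ===== SOURCE B (Python) =====
-- def get_qiskit_like_output(results_list):
--     # Worklist partition: take the first remaining key, count and remove all its
--     # occurrences in one pass, repeat on the shrunken worklist.
--     keys = [''.join(map(str, reversed(arr))) for arr in results_list]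
--     counts = {}
--     while keys:
--         head = keys[0]
--         rest = keys[1:]
--         counts[head] = 1 + sum(1 for k in rest if k == head)
--         keys = [k for k in rest if k != head]
--     return counts
-- ===== Notes on version B (the rewrite author's own statement) =====
-- stated objective: alternative
-- what changed: Replaces A's map+zip+per-element results.count construction with a worklist partition loop: repeatedly count and remove all occurrences of the first remaining key, so each distinct key is scanned once and processed elements leave the worklist.
import Mathlib
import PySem

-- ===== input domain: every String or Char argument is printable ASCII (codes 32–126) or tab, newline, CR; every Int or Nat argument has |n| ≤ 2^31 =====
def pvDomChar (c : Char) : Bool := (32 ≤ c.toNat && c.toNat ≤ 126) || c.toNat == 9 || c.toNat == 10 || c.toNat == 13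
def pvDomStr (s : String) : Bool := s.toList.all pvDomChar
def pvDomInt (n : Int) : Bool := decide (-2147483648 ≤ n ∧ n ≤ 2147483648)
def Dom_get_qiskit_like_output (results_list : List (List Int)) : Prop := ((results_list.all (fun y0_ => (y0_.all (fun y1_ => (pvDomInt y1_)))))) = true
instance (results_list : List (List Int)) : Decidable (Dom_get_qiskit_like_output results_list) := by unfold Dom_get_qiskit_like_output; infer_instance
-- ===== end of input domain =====

-- B replaces A's map+zip+per-element results.count construction with a worklist
-- partition loop (count and remove all occurrences of the first remaining key);
-- objective: alternative decomposition of the same task.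

-- ===== PORT A =====
-- reduce(lambda x, y: str(x) + str(y), arr[::-1], ""): the accumulator x is always a
-- string, so str(x) is the identity; arr[::-1] never raises, so the slice? default is unreachable.
def get_qiskit_like_output (results_list : List (List Int)) : List (String × Int) :=
  let results := results_list.map
    (fun arr => ((PySem.List.slice? arr none none (-1)).getD []).foldl
      (fun x y => x ++ PySem.Int.toStr y) "")
  let counts := PySem.Dict.ofList
    (results.zip (results.map (fun i => ((PySem.List.count results i : Nat) : Int))))
  counts.items

-- ===== PORT B =====
-- the while-loop of Source B: head = keys[0]; count it in the rest; drop its occurrences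
def pvTallyLoop : List String → PySem.Dict String Int → PySem.Dict String Int
  | [], counts => counts
  | head :: rest, counts =>
      pvTallyLoop (rest.filter (fun k => !(k == head)))
        (counts.insert head (1 + ((rest.filter (fun k => k == head)).length : Int)))
termination_by ks _ => ks.length
decreasing_by simpa using Nat.lt_succ_of_le (le_trans (List.length_filter_le _ _) (by simp))

def get_qiskit_like_output_alt (results_list : List (List Int)) : List (String × Int) :=
  let keys := results_list.map
    (fun arr => PySem.Str.join "" (arr.reverse.map PySem.Int.toStr))
  (pvTallyLoop keys PySem.Dict.empty).items

-- ===== PRECONDITION & SPEC =====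
def Spec_get_qiskit_like_output (results_list : List (List Int)) (out : List (String × Int)) : Prop := out = get_qiskit_like_output_alt results_list
instance (results_list : List (List Int)) (out : List (String × Int)) : Decidable (Spec_get_qiskit_like_output results_list out) := by unfold Spec_get_qiskit_like_output; infer_instance

-- ===== CLAIM (what is proved, stated in full; the proofs are below) =====
def Claim_equal_get_qiskit_like_output : Prop := ∀ (results_list : List (List Int)), Dom_get_qiskit_like_output results_list → Spec_get_qiskit_like_output results_list (get_qiskit_like_output results_list)

-- ===== LEMMAS AND PROOFS =====

-- ''.join over '' separator concatenates
theorem pv_ic_cons (cs : List Char) (css : List (List Char)) :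
    List.intercalate ([] : List Char) (cs :: css) = cs ++ List.intercalate [] css := by
  cases css <;> simp [List.intercalate, List.intersperse]

theorem pv_join_nil_cons (x : String) (xs : List String) :
    PySem.Str.join "" (x :: xs) = x ++ PySem.Str.join "" xs := by
  show String.ofList (List.intercalate [] (x.toList :: xs.map String.toList))
     = x ++ String.ofList (List.intercalate [] (xs.map String.toList))
  rw [pv_ic_cons]
  simp

-- A's fold-concatenation of a key equals B's ''.join of the mapped strings
theorem pv_key_eq (l : List Int) (s : String) :
    l.foldl (fun x y => x ++ PySem.Int.toStr y) s
      = s ++ PySem.Str.join "" (l.map PySem.Int.toStr) := by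
  induction l generalizing s with
  | nil => simp [PySem.Str.join]
  | cons a t ih =>
      simp only [List.foldl_cons, List.map_cons, pv_join_nil_cons, ih,
        String.append_assoc]

-- fold of Set.add ignores elements already present
theorem pv_foldl_add_filter (h : String) (l : List String) (s : PySem.Set String)
    (hmem : h ∈ s) :
    l.foldl PySem.Set.add s = (l.filter (fun k => !(k == h))).foldl PySem.Set.add s := by
  induction l generalizing s with
  | nil => rfl
  | cons x t ih =>
      by_cases hx : x = h
      · subst hx
        rw [List.filter_cons_of_neg (by simp), List.foldl_cons, PySem.Set.add_of_mem hmem]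
        exact ih s hmem
      · rw [List.filter_cons_of_pos (by simp [hx]), List.foldl_cons, List.foldl_cons]
        exact ih _ ((PySem.Set.mem_add _ _ _).mpr (Or.inl hmem))

-- a head not occurring later stays in front of the accumulated set
theorem pv_foldl_add_head (h : String) (l : List String) :
    h ∉ l → ∀ s : List String,
    l.foldl PySem.Set.add (h :: s) = h :: l.foldl PySem.Set.add s := by
  induction l with
  | nil => intro _ s; rfl
  | cons x t ih =>
      intro hl s
      have hxh : x ≠ h := fun e => hl (e ▸ List.mem_cons_self ..)
      have hth : h ∉ t := fun e => hl (List.mem_cons_of_mem _ e)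
      simp only [List.foldl_cons]
      rw [show PySem.Set.add (h :: s) x = h :: PySem.Set.add s x from ?step, ih hth]
      rw [PySem.Set.add_eq_ite, PySem.Set.add_eq_ite]
      by_cases hxs : x ∈ s
      · simp [hxs, hxh]
      · simp [hxs, hxh]

-- first-occurrence dedup of h :: t: h, then the dedup of t with h removed
theorem pv_ofList_cons (h : String) (t : List String) :
    PySem.Set.ofList (h :: t)
      = h :: PySem.Set.ofList (t.filter (fun k => !(k == h))) := by
  have h1 : PySem.Set.ofList (h :: t)
      = t.foldl PySem.Set.add (PySem.Set.add PySem.Set.empty h) := by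
    rw [PySem.Set.ofList_eq_foldl]; rfl
  have hadd : PySem.Set.add PySem.Set.empty h = [h] :=
    PySem.Set.add_of_not_mem (List.not_mem_nil)
  have hnot : h ∉ t.filter (fun k => !(k == h)) := by
    intro hm
    have := (List.mem_filter.mp hm).2
    simp at this
  rw [h1, hadd, pv_foldl_add_filter h t [h] (List.mem_cons_self ..),
    pv_foldl_add_head h _ hnot, ← PySem.Set.ofList_eq_foldl]

-- the worklist loop, run on fresh keys, appends Counter-style items
theorem pv_tally_items (ks : List String) (d : PySem.Dict String Int)
    (hfresh : ∀ k ∈ ks, d.contains k = false) :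
    (pvTallyLoop ks d).items
      = d.items ++ (PySem.Set.ofList ks).map (fun k => (k, (ks.count k : Int))) := by
  induction hn : ks.length using Nat.strong_induction_on generalizing ks d with
  | _ n ihn =>
  match ks, hfresh with
  | [], _ => simp [pvTallyLoop]
  | head :: rest, hfresh =>
      subst hn
      have ih := fun (d' : PySem.Dict String Int) hf =>
        ihn (rest.filter (fun k => !(k == head))).length
          (Nat.lt_succ_of_le (List.length_filter_le _ _))
          (rest.filter (fun k => !(k == head))) d' hf rfl
      rw [pvTallyLoop]
      set rest' := rest.filter (fun k => !(k == head)) with hrest'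
      set c : Int := 1 + ((rest.filter (fun k => k == head)).length : Int) with hc
      have hheadfresh : d.contains head = false := hfresh head (List.mem_cons_self ..)
      have hfresh' : ∀ k ∈ rest', (d.insert head c).contains k = false := by
        intro k hk
        have hkne : k ≠ head := by
          have := (List.mem_filter.mp hk).2; simpa using this
        have hkrest : k ∈ rest := (List.mem_filter.mp hk).1
        rw [PySem.Dict.contains_insert]
        simp [hkne, hfresh k (List.mem_cons_of_mem _ hkrest)]
      rw [ih _ hfresh',
        PySem.Dict.items_insert_of_not_contains _ _ hheadfresh,
        pv_ofList_cons, List.map_cons, List.append_assoc]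
      congr 1
      rw [List.singleton_append]
      congr 1
      · -- the head's count
        have hcnt : List.count head (head :: rest)
            = (rest.filter (fun k => k == head)).length + 1 := by
          rw [List.count_cons_self, List.count_eq_countP, List.countP_eq_length_filter]
        rw [hcnt, hc]
        congr 1
        push_cast
        ring
      · -- counts of the remaining keys agree with counts in the filtered worklist
        apply List.map_congr_left
        intro k hk
        have hkmem : k ∈ rest' := (PySem.Set.mem_ofList ..).mp hk
        have hkne : k ≠ head := by
          have := (List.mem_filter.mp hkmem).2; simpa using this
        have h1 : List.count k (head :: rest) = List.count k rest := by
          rw [List.count_cons]; simp [Ne.symm hkne]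
        have h2 : List.count k rest' = List.count k rest := by
          rw [hrest']
          rw [List.count_eq_countP, List.count_eq_countP, List.countP_filter]
          congr 1
          funext x
          by_cases hx : x = k <;> simp [hx, hkne]
        rw [h1, ← h2]

-- dict(zip(L, L.map g)) is a fold of per-key inserts
theorem pv_zip_fold (L : List String) (g : String → Int) (d : PySem.Dict String Int) :
    (L.zip (L.map g)).foldl (fun acc p => acc.insert p.1 p.2) d
      = L.foldl (fun acc k => acc.insert k (g k)) d := by
  induction L generalizing d with
  | nil => rfl
  | cons x t ih => simp [ih]

-- lookup after a fold of inserts whose value depends only on the key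
theorem pv_get?_fold (L : List String) (g : String → Int) (d : PySem.Dict String Int)
    (k : String) :
    (L.foldl (fun acc k => acc.insert k (g k)) d).get? k
      = if k ∈ L then some (g k) else d.get? k := by
  induction L generalizing d with
  | nil => simp
  | cons x t ih =>
    simp only [List.foldl_cons, ih, PySem.Dict.get?_insert, List.mem_cons]
    by_cases hkt : k ∈ t <;> by_cases hkx : k = x <;> simp [hkt, hkx]

theorem pv_main (results_list : List (List Int)) :
    get_qiskit_like_output results_list = get_qiskit_like_output_alt results_list := by
  unfold get_qiskit_like_output get_qiskit_like_output_alt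
  simp only [PySem.List.slice?_none_none_neg_one, Option.getD_some]
  have hkey : ∀ arr : List Int,
      arr.reverse.foldl (fun x y => x ++ PySem.Int.toStr y) ""
        = PySem.Str.join "" (arr.reverse.map PySem.Int.toStr) := by
    intro arr; rw [pv_key_eq]; simp
  simp only [hkey]
  set results := results_list.map
    (fun arr => PySem.Str.join "" (arr.reverse.map PySem.Int.toStr)) with hres
  -- B side: Counter-shaped items of the worklist loop
  rw [pv_tally_items results PySem.Dict.empty
    (fun k _ => PySem.Dict.contains_empty k),
    show (PySem.Dict.empty : PySem.Dict String Int).items = [] from rfl, List.nil_append]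
  -- A side: dict(zip(results, counts)) as a fold of per-key inserts
  rw [show PySem.Dict.ofList
        (results.zip (results.map (fun i => ((PySem.List.count results i : Nat) : Int))))
      = results.foldl
        (fun acc k => acc.insert k ((PySem.List.count results k : Nat) : Int))
        PySem.Dict.empty from pv_zip_fold results _ _]
  rw [PySem.Dict.items_eq_map_keys _ ?nodup 0]
  case nodup =>
    exact PySem.Dict.nodup_keys_foldl_insert results
      (fun _ k => ((PySem.List.count results k : Nat) : Int)) _
      (by simp [PySem.Dict.keys_empty])
  rw [show (results.foldl
        (fun acc k => acc.insert k ((PySem.List.count results k : Nat) : Int))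
        PySem.Dict.empty).keys = PySem.Set.ofList results from ?keys]
  case keys =>
    rw [PySem.Dict.keys_foldl_insert results
      (fun _ k => ((PySem.List.count results k : Nat) : Int)) _]
    rw [PySem.Dict.keys_empty, PySem.Set.update_eq_foldl, PySem.Set.ofList_eq_foldl]
  apply List.map_congr_left
  intro k hk
  have hkmem : k ∈ results := (PySem.Set.mem_ofList results k).mp hk
  rw [PySem.Dict.getD_eq_get?_getD, pv_get?_fold, if_pos hkmem]
  simp [PySem.List.count_eq]

-- ===== VERDICT (by name: the statement is the Claim_ definition above) =====
theorem get_qiskit_like_output_spec : Claim_equal_get_qiskit_like_output := by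
  intro results_list _
  unfold Spec_get_qiskit_like_output
  exact pv_main results_list
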